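-- pv_equiv track=rewrite | github.com/SunXingzhi/seamless_attendance | seamless_attendance/src/main/python/main.py | bitmap_to_custom_hex
-- ===== SOURCE A (Python) =====
-- bytes_per_line = 24
--
-- indent = "  "
--
-- def bitmap_to_custom_hex(bitmap):
-- 	"""转换为指定样式的十六进制字模"""
-- 	hex_bytes = []
-- 	for row in bitmap:
-- 		for i in range(0, len(row), 8):
-- 			byte = 0
-- 			for j in range(8):
-- 				if i + j < len(row) and row[i + j] == 0:
-- 					byte |= (1 << (7 - j))
-- 			hex_bytes.append(f"0x{byte:02X}")
--
-- 	# 按每行24个拼接格式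
-- 	custom_hex_lines = []
-- 	for i in range(0, len(hex_bytes), bytes_per_line):
-- 		line_bytes = hex_bytes[i:i+bytes_per_line]
-- 		line_str = ",".join(line_bytes)
-- 		if i + bytes_per_line < len(hex_bytes):
-- 			line_str += ","
-- 		custom_hex_lines.append(f"{indent}{line_str}")
--
-- 	return "\n".join(custom_hex_lines)
-- ===== SOURCE B (Python) =====
-- bytes_per_line = 24
--
-- indent = "  "
--
-- def _chunks(xs, n):
--     out = []
--     while xs:
--         out.append(xs[:n])
--         xs = xs[n:]
--     return out
--
-- def _byte_of(chunk):
--     byte = 0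
--     for j, v in enumerate(chunk):
--         if v == 0:
--             byte |= 128 >> j
--     return byte
--
-- def bitmap_to_custom_hex(bitmap):
--     """Same output as A: chunk rows into 8-pixel bytes, then join groups of 24."""
--     hex_bytes = ["0x%02X" % _byte_of(c) for row in bitmap for c in _chunks(row, 8)]
--     if not hex_bytes:
--         return ""
--     groups = _chunks(hex_bytes, bytes_per_line)
--     return indent + (",\n" + indent).join(",".join(g) for g in groups)
-- ===== Notes on version B (the rewrite author's own statement) =====
-- stated objective: simpler
-- what changed: Replaces A's index-range loops and trailing-comma branch with chunking: rows are sliced into 8-element chunks (byte built from enumerate with 128>>j masks) and the hex bytes are chunked into groups of 24 joined with ', ' + indent, so no per-line comma logic remains.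
import Mathlib
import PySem

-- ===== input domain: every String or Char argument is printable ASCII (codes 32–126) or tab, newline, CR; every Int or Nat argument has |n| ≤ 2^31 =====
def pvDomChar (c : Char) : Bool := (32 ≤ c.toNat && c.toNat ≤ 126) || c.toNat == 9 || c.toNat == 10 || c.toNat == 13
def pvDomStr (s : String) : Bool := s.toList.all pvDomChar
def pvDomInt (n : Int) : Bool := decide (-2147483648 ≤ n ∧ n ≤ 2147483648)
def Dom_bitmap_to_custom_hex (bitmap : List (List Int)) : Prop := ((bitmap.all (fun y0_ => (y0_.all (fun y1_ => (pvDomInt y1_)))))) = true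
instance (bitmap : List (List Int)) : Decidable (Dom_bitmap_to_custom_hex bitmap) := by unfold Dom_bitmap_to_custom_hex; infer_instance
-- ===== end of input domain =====

-- B rebuilds the same string by chunking (8-wide pixel chunks, 24-wide byte groups joined with ",\n  "),
-- dropping A's index ranges and per-line trailing-comma branch; objective: simpler.

-- ===== PORT A =====
-- f"0x{byte:02X}" — hand port, exact for 0 ≤ byte ≤ 255 (two uppercase hex digits)
def pvHexDigit (n : Nat) : Char := if n < 10 then Char.ofNat (48 + n) else Char.ofNat (55 + n)
def pvHexByte (b : Nat) : String := String.ofList ['0', 'x', pvHexDigit (b / 16), pvHexDigit (b % 16)]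

-- the innermost 'for j in range(8)' loop of A; j ∈ 0..7 and byte ≥ 0, so Nat arithmetic is exact
def pvAByte (row : List Int) (i : Int) : Nat :=
  (List.range 8).foldl (fun (b : Nat) (j : Nat) =>
    if decide (i + (j : Int) < (row.length : Int)) && (PySem.List.pyGetD row (i + (j : Int)) 1 == 0)
    then b ||| (1 <<< (7 - j)) else b) 0

def bitmap_to_custom_hex (bitmap : List (List Int)) : String :=
  let hex_bytes : List String :=
    bitmap.foldl (fun acc row =>
      (PySem.List.pyRange 0 (row.length : Int) 8).foldl (fun acc2 i =>
        acc2 ++ [pvHexByte (pvAByte row i)]) acc) []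
  let custom_hex_lines : List String :=
    (PySem.List.pyRange 0 (hex_bytes.length : Int) 24).foldl (fun ls i =>
      let line_bytes := PySem.List.slice hex_bytes (some i) (some (i + 24))
      let line_str := PySem.Str.join "," line_bytes
      let line_str := if i + 24 < (hex_bytes.length : Int) then line_str ++ "," else line_str
      ls ++ ["  " ++ line_str]) []
  PySem.Str.join "\n" custom_hex_lines

-- ===== PORT B =====
-- _chunks(xs, n): successive slices xs[:n] / xs[n:] (used with n = 8 and n = 24)
def pvChunks {α : Type} (n : Nat) : List α → List (List α)
  | [] => []
  | x :: xs => ((x :: xs).take n) :: pvChunks n (xs.drop (n - 1))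
termination_by xs => xs.length
decreasing_by simp [List.length_drop]

-- _byte_of(chunk); the enumerate index is ≥ 0, so .toNat is exact for Python's 128 >> j
def pvByteOf (chunk : List Int) : Nat :=
  (PySem.List.enumerate chunk).foldl
    (fun (byte : Nat) (p : Int × Int) => if p.2 == 0 then byte ||| (128 >>> p.1.toNat) else byte) 0

def bitmap_to_custom_hex_alt (bitmap : List (List Int)) : String :=
  let hex_bytes : List String :=
    bitmap.flatMap (fun row => (pvChunks 8 row).map (fun c => pvHexByte (pvByteOf c)))
  if hex_bytes.isEmpty then ""
  else "  " ++ PySem.Str.join (",\n" ++ "  ") ((pvChunks 24 hex_bytes).map (fun g => PySem.Str.join "," g))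

-- ===== PRECONDITION & SPEC =====
def Spec_bitmap_to_custom_hex (bitmap : List (List Int)) (out : String) : Prop := out = bitmap_to_custom_hex_alt bitmap
instance (bitmap : List (List Int)) (out : String) : Decidable (Spec_bitmap_to_custom_hex bitmap out) := by unfold Spec_bitmap_to_custom_hex; infer_instance

-- ===== CLAIM (what is proved, stated in full; the proofs are below) =====
def Claim_equal_bitmap_to_custom_hex : Prop := ∀ (bitmap : List (List Int)), Dom_bitmap_to_custom_hex bitmap → Spec_bitmap_to_custom_hex bitmap (bitmap_to_custom_hex bitmap)

-- ===== LEMMAS AND PROOFS =====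

-- a fold whose step never changes the accumulator is the identity
lemma pv_foldl_id {α β : Type} (l : List α) (f : β → α → β) (b : β)
    (h : ∀ c, ∀ x ∈ l, f c x = c) : l.foldl f b = b := by
  induction l generalizing b with
  | nil => rfl
  | cons x xs ih =>
      simp only [List.foldl_cons, h b x (by simp)]
      exact ih b (fun c y hy => h c y (by simp [hy]))

-- peel one step off a positive-step range from 0
lemma pv_pyRange_step_cons (b s : Int) (hs : 0 < s) (hb : 0 < b) :
    PySem.List.pyRange 0 b s = 0 :: (PySem.List.pyRange 0 (b - s) s).map (· + s) := by
  rw [PySem.List.pyRange_of_pos 0 b hs, PySem.List.pyRange_of_pos 0 (b - s) hs]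
  have h2 : (b - 1 + 1 * s) / s = (b - 1) / s + 1 := Int.add_mul_ediv_right _ _ (by omega)
  have key : ((b - 0 + s - 1) / s).toNat
      = (if 0 < b - s then ((b - s - 0 + s - 1) / s).toNat else 0) + 1 := by
    have h1 : b - 0 + s - 1 = b - 1 + 1 * s := by ring
    by_cases hbs : 0 < b - s
    · have h3 : b - s - 0 + s - 1 = b - 1 := by ring
      have h4 : 0 ≤ (b - 1) / s := Int.ediv_nonneg (by omega) (by omega)
      simp only [hbs, if_pos, h1, h2, h3]
      omega
    · have h5 : (b - 1) / s = 0 := Int.ediv_eq_zero_of_lt (by omega) (by omega)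
      simp only [hbs, if_false, h1, h2, h5]
      rfl
  rw [if_pos hb, key, List.range_succ_eq_map]
  simp only [List.map_cons, List.map_map]
  refine List.cons_eq_cons.mpr ⟨by simp, ?_⟩
  apply List.map_congr_left
  intro k _
  simp only [Function.comp_apply, Nat.succ_eq_add_one]
  push_cast
  ring

lemma pv_pyRange_nil (b s : Int) (hs : 0 < s) (hb : b ≤ 0) :
    PySem.List.pyRange 0 b s = [] := by
  rw [PySem.List.pyRange_of_pos 0 b hs]
  simp [show ¬((0:Int) < b) by omega]

-- A's inner byte loop computes B's byte of the corresponding 8-chunk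
lemma pv_aByte_zero (row : List Int) : pvAByte row 0 = pvByteOf (row.take 8) := by
  have hcl : (row.take 8).length = min 8 row.length := by simp
  have h1 : pvAByte row 0 = (List.range 8).foldl (fun (b : Nat) (j : Nat) =>
      if decide (j < (row.take 8).length) && (PySem.List.pyGetD (row.take 8) (j : Int) 1 == 0)
      then b ||| (128 >>> j) else b) 0 := by
    unfold pvAByte
    apply PySem.List.foldl_congr_mem
    intro b j hj
    have hj8 : j < 8 := List.mem_range.mp hj
    have hbit : (1 <<< (7 - j) : Nat) = 128 >>> j := by interval_cases j <;> rfl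
    by_cases hcnd : j < (row.take 8).length
    · have h2 : (0 : Int) + (j : Int) < (row.length : Int) := by omega
      have hjl : j < row.length := by omega
      simp [hbit, hjl, hj8, List.getD_eq_getElem?_getD]
    · have hlen : ¬ j < row.length := by omega
      simp [hlen]
  have h2 : pvByteOf (row.take 8) = (List.range (row.take 8).length).foldl
      (fun (b : Nat) (k : Nat) =>
        if PySem.List.pyGetD (row.take 8) (k : Int) 1 == 0 then b ||| (128 >>> k) else b) 0 := by
    unfold pvByteOf
    rw [PySem.List.enumerate_eq_map_pyRange (row.take 8) 1, PySem.List.pyRange_one]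
    simp only [List.map_map, List.foldl_map]
    apply PySem.List.foldl_congr_mem
    intro b k _
    simp
  rw [h1, h2, show List.range 8 = List.range ((row.take 8).length)
        ++ (List.range (8 - (row.take 8).length)).map (fun i => (row.take 8).length + i) from by
      rw [← List.range_add]; congr 1; omega,
    List.foldl_append]
  have h3 : ∀ (c : Nat), ∀ x ∈ (List.range (8 - (row.take 8).length)).map
      (fun i => (row.take 8).length + i),
      (if decide (x < (row.take 8).length) && (PySem.List.pyGetD (row.take 8) (x : Int) 1 == 0)
       then c ||| (128 >>> x) else c) = c := by
    intro c x hx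
    obtain ⟨i, hi, rfl⟩ := List.mem_map.mp hx
    rw [if_neg]
    simp only [Bool.and_eq_true, decide_eq_true_eq, not_and]
    intro h
    exact absurd h (by omega)
  rw [pv_foldl_id _ _ _ h3]
  apply PySem.List.foldl_congr_mem
  intro b j hj
  have hjl : j < (row.take 8).length := List.mem_range.mp hj
  have hj8' : j < 8 := by omega
  have hjr : j < row.length := by omega
  simp [hj8', hjr]

lemma pv_aByte_shift (row : List Int) (i : Int) (hi : 0 ≤ i) :
    pvAByte row (i + 8) = pvAByte (row.drop 8) i := by
  unfold pvAByte
  apply PySem.List.foldl_congr_mem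
  intro b j hj
  have hj8 : j < 8 := List.mem_range.mp hj
  have hd : (List.drop 8 row).length = row.length - 8 := by simp
  by_cases hc : i + (j : Int) < ((List.drop 8 row).length : Int)
  · have hc1 : i + 8 + (j : Int) < (row.length : Int) := by omega
    have hget : PySem.List.pyGetD row (i + 8 + (j : Int)) 1
        = PySem.List.pyGetD (List.drop 8 row) (i + (j : Int)) 1 := by
      obtain ⟨k, hk⟩ : ∃ k : Nat, i + (j : Int) = (k : Int) := ⟨(i + (j : Int)).toNat, by omega⟩
      rw [hk, show i + 8 + (j : Int) = ((k + 8 : Nat) : Int) by omega,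
          PySem.List.pyGetD_natCast, PySem.List.pyGetD_natCast]
      simp [List.getD_eq_getElem?_getD, List.getElem?_drop, Nat.add_comm]
    have hc2 : i + (j : Int) < ((row.length - 8 : Nat) : Int) := by omega
    simp [hc1, hc2, hget]
  · have hc1 : ¬ (i + 8 + (j : Int) < (row.length : Int)) := by omega
    have hc2 : ¬ (i + (j : Int) < ((row.length - 8 : Nat) : Int)) := by omega
    simp [hc1, hc2]

-- per row: A's byte list = B's byte list
lemma pv_row_eq (n : Nat) : ∀ (row : List Int), row.length = n →
    (PySem.List.pyRange 0 (row.length : Int) 8).map (fun i => pvAByte row i)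
      = (pvChunks 8 row).map pvByteOf := by
  induction n using Nat.strong_induction_on with
  | _ n ih =>
    intro row hn
    cases row with
    | nil => simp [pv_pyRange_nil 0 8 (by norm_num) (by norm_num), pvChunks]
    | cons x xs =>
      have hpos : (0 : Int) < (((x :: xs).length : Nat) : Int) := by
        simp
      rw [pv_pyRange_step_cons _ 8 (by norm_num) hpos, List.map_cons, List.map_map]
      have hch : pvChunks 8 (x :: xs) = ((x :: xs).take 8) :: pvChunks 8 ((x :: xs).drop 8) := by
        rw [pvChunks]
        rfl
      rw [hch, List.map_cons]
      refine List.cons_eq_cons.mpr ⟨by simpa using pv_aByte_zero (x :: xs), ?_⟩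
      by_cases h8 : 8 ≤ (x :: xs).length
      · have h8' : 7 ≤ xs.length := by simp at h8; omega
        have e1 : (((x :: xs).length : Nat) : Int) - 8 = ((((x :: xs).drop 8).length : Nat) : Int) := by
          simp; omega
        rw [e1, ← ih ((x :: xs).drop 8).length (by simp at hn ⊢; omega) ((x :: xs).drop 8) rfl]
        apply List.map_congr_left
        intro i hi
        have hi0 : 0 ≤ i := ((PySem.List.mem_pyRange_iff_of_pos (by norm_num) i).mp hi).1
        simpa using pv_aByte_shift (x :: xs) i hi0
      · have e2 : (((x :: xs).length : Nat) : Int) - 8 ≤ 0 := by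
          omega
        have hdrop : (x :: xs).drop 8 = [] := List.drop_eq_nil_iff.mpr (by omega)
        rw [pv_pyRange_nil _ 8 (by norm_num) e2, hdrop]
        simp [pvChunks]

-- the whole hex_bytes lists agree
lemma pv_hexbytes_eq (bitmap : List (List Int)) :
    bitmap.foldl (fun acc row =>
      (PySem.List.pyRange 0 (row.length : Int) 8).foldl (fun acc2 i =>
        acc2 ++ [pvHexByte (pvAByte row i)]) acc) []
    = bitmap.flatMap (fun row => (pvChunks 8 row).map (fun c => pvHexByte (pvByteOf c))) := by
  rw [PySem.List.foldl_congr_mem bitmap _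
      (fun acc row => acc ++ (pvChunks 8 row).map (fun c => pvHexByte (pvByteOf c))) []
      (by
        intro acc row _
        rw [PySem.List.foldl_append_singleton_eq_map (fun i => pvHexByte (pvAByte row i))]
        congr 1
        rw [show (PySem.List.pyRange 0 (row.length : Int) 8).map (fun i => pvHexByte (pvAByte row i))
              = ((PySem.List.pyRange 0 (row.length : Int) 8).map (fun i => pvAByte row i)).map pvHexByte
            from by rw [List.map_map]; rfl,
            pv_row_eq row.length row rfl, List.map_map]
        rfl)]
  rw [PySem.List.foldl_append_eq_flatMap]
  rfl

-- proof-only helpers: A's line expression as a function, and string-join facts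
def pvLineA (hb : List String) (i : Int) : String :=
  "  " ++ (if i + 24 < (hb.length : Int)
           then PySem.Str.join "," (PySem.List.slice hb (some i) (some (i + 24))) ++ ","
           else PySem.Str.join "," (PySem.List.slice hb (some i) (some (i + 24))))

lemma pv_strJoin_nil (s : String) : PySem.Str.join s [] = "" := by
  apply String.ext; simp [PySem.Str.toList_join, PySem.Chars.join_nil]

lemma pv_strJoin_singleton (s p : String) : PySem.Str.join s [p] = p := by
  apply String.ext; simp [PySem.Str.toList_join, PySem.Chars.join_singleton]

lemma pv_strJoin_cons_cons (s p q : String) (r : List String) :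
    PySem.Str.join s (p :: q :: r) = p ++ s ++ PySem.Str.join s (q :: r) := by
  apply String.ext
  simp [PySem.Str.toList_join, PySem.Chars.join_cons_cons, String.toList_append]

lemma pv_strJoin_cons_ne (s p : String) (l : List String) (h : l ≠ []) :
    PySem.Str.join s (p :: l) = p ++ s ++ PySem.Str.join s l := by
  cases l with
  | nil => exact absurd rfl h
  | cons q r => exact pv_strJoin_cons_cons s p q r

-- A's per-line loop body is exactly pvLineA (definitional)
lemma pv_foldl_lines (hb : List String) :
    (PySem.List.pyRange 0 (hb.length : Int) 24).foldl (fun ls i =>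
      ls ++ ["  " ++ (if i + 24 < (hb.length : Int)
                      then PySem.Str.join "," (PySem.List.slice hb (some i) (some (i + 24))) ++ ","
                      else PySem.Str.join "," (PySem.List.slice hb (some i) (some (i + 24))))]) []
    = (PySem.List.pyRange 0 (hb.length : Int) 24).map (pvLineA hb) :=
  PySem.List.foldl_append_singleton_eq_map (pvLineA hb) _ []

-- shifting the line start by 24 = dropping the first 24 hex bytes
lemma pv_lineA_shift (hb : List String) (i : Int) (hi : 0 ≤ i) :
    pvLineA hb (i + 24) = pvLineA (hb.drop 24) i := by
  unfold pvLineA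
  have hd : (hb.drop 24).length = hb.length - 24 := by simp
  have hsl : PySem.List.slice hb (some (i + 24)) (some (i + 24 + 24))
      = PySem.List.slice (hb.drop 24) (some i) (some (i + 24)) := by
    rw [PySem.List.slice_toNat hb (by omega) (by omega),
        PySem.List.slice_toNat (hb.drop 24) hi (by omega),
        List.drop_drop]
    congr 1
    · omega
    · congr 1
      omega
  by_cases hc : i + 24 < ((hb.drop 24).length : Int)
  · have hc1 : (i + 24) + 24 < (hb.length : Int) := by omega
    rw [if_pos hc, if_pos hc1, hsl]
  · have hc1 : ¬ ((i + 24) + 24 < (hb.length : Int)) := by omega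
    rw [if_neg hc, if_neg hc1, hsl]

-- line assembly: A's per-line map + the newline join = B's chunked join
lemma pv_joinLines (n : Nat) : ∀ (hb : List String), hb.length = n →
    PySem.Str.join "\n" ((PySem.List.pyRange 0 (hb.length : Int) 24).map (pvLineA hb))
    = if hb.isEmpty then ""
      else "  " ++ PySem.Str.join (",\n" ++ "  ") ((pvChunks 24 hb).map (fun g => PySem.Str.join "," g)) := by
  induction n using Nat.strong_induction_on with
  | _ n ih =>
    intro hb hn
    cases hb with
    | nil =>
        rw [pv_pyRange_nil _ 24 (by norm_num) (by simp)]
        simp [pv_strJoin_nil]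
    | cons x xs =>
      have hpos : (0 : Int) < (((x :: xs).length : Nat) : Int) := by simp
      rw [pv_pyRange_step_cons _ 24 (by norm_num) hpos, List.map_cons, List.map_map]
      have hch : pvChunks 24 (x :: xs) = ((x :: xs).take 24) :: pvChunks 24 ((x :: xs).drop 24) := by
        rw [pvChunks]
        rfl
      have hsl0 : PySem.List.slice (x :: xs) (some 0) (some (0 + 24)) = (x :: xs).take 24 := by
        rw [PySem.List.slice_toNat _ (by norm_num) (by norm_num)]
        simp
      by_cases h24 : 24 < (x :: xs).length
      · -- more than one line
        have h23 : 23 ≤ xs.length := by simp at h24; omega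
        have e1 : (((x :: xs).length : Nat) : Int) - 24 = ((((x :: xs).drop 24).length : Nat) : Int) := by
          simp; omega
        have htail : ((PySem.List.pyRange 0 ((((x :: xs).length : Nat) : Int) - 24) 24).map
              (pvLineA (x :: xs) ∘ (· + 24)))
            = (PySem.List.pyRange 0 ((((x :: xs).drop 24).length : Nat) : Int) 24).map
              (pvLineA ((x :: xs).drop 24)) := by
          rw [e1]
          apply List.map_congr_left
          intro i hi
          have hi0 : 0 ≤ i := ((PySem.List.mem_pyRange_iff_of_pos (by norm_num) i).mp hi).1
          simpa using pv_lineA_shift (x :: xs) i hi0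
        rw [htail]
        obtain ⟨y, ys, hys⟩ : ∃ y ys, (x :: xs).drop 24 = y :: ys := by
          cases hd : (x :: xs).drop 24 with
          | nil =>
              exfalso
              have := List.drop_eq_nil_iff.mp hd
              omega
          | cons y ys => exact ⟨y, ys, rfl⟩
        have hlpos : (0 : Int) < ((((x :: xs).drop 24).length : Nat) : Int) := by
          rw [hys]; simp
        have hLne : (PySem.List.pyRange 0 ((((x :: xs).drop 24).length : Nat) : Int) 24).map
            (pvLineA ((x :: xs).drop 24)) ≠ [] := by
          rw [pv_pyRange_step_cons _ 24 (by norm_num) hlpos]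
          simp
        rw [pv_strJoin_cons_ne _ _ _ hLne]
        have hIH := ih ((x :: xs).drop 24).length (by simp at hn ⊢; omega) ((x :: xs).drop 24) rfl
        rw [hys] at hIH
        simp only [List.isEmpty_cons, Bool.false_eq_true, if_false] at hIH
        rw [hys, hIH]
        have hhead : pvLineA (x :: xs) 0 = "  " ++ (PySem.Str.join "," ((x :: xs).take 24) ++ ",") := by
          unfold pvLineA
          rw [if_pos (by omega), hsl0]
        have hCne : (pvChunks 24 ((x :: xs).drop 24)).map (fun g => PySem.Str.join "," g) ≠ [] := by
          rw [hys, pvChunks]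
          simp
        rw [hhead, if_neg (by simp), hch, List.map_cons, hys,
            pv_strJoin_cons_ne _ _ _ (hys ▸ hCne)]
        apply String.ext
        simp only [String.toList_append, show (",\n" ++ "  " : String) = ",\n  " from rfl,
          show ("  " : String).toList = [' ', ' '] from rfl,
          show ("," : String).toList = [','] from rfl,
          show ("\n" : String).toList = ['\n'] from rfl,
          show (",\n  " : String).toList = [',', '\n', ' ', ' '] from rfl]
        simp [List.append_assoc]
      · -- exactly one line
        have e2 : (((x :: xs).length : Nat) : Int) - 24 ≤ 0 := by omega
        rw [pv_pyRange_nil _ 24 (by norm_num) e2]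
        simp only [List.map_nil]
        rw [pv_strJoin_singleton]
        have hcond : ¬ ((0 : Int) + 24 < (((x :: xs).length : Nat) : Int)) := by omega
        have htake : (x :: xs).take 24 = x :: xs := List.take_of_length_le (by omega)
        have hdrop : (x :: xs).drop 24 = [] := List.drop_eq_nil_iff.mpr (by omega)
        unfold pvLineA
        rw [if_neg hcond, hsl0, htake, if_neg (by simp), hch, hdrop, htake]
        rw [show pvChunks 24 ([] : List String) = [] from by rw [pvChunks]]
        rw [List.map_cons, List.map_nil, pv_strJoin_singleton]

-- ===== VERDICT (by name: the statement is the Claim_ definition above) =====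
theorem bitmap_to_custom_hex_spec : Claim_equal_bitmap_to_custom_hex := by
  intro bitmap _
  unfold Spec_bitmap_to_custom_hex
  show bitmap_to_custom_hex bitmap = bitmap_to_custom_hex_alt bitmap
  simp only [bitmap_to_custom_hex, bitmap_to_custom_hex_alt]
  rw [pv_hexbytes_eq, pv_foldl_lines,
      pv_joinLines (bitmap.flatMap (fun row => (pvChunks 8 row).map (fun c => pvHexByte (pvByteOf c)))).length _ rfl]
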